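-- pv_equiv track=rewrite | github.com/xorgies/PokemonOpalo | JsonTransformer/src/leerPokemon.py | convertirArrayMovimientos
-- ===== SOURCE A (Python) =====
-- def convertirArrayMovimientos(array):
--     arrayNiveles=[]
--     arrayMovimientos=[]
--     arrayRespuesta=[]
--
--     for i in array[::2]:
--         arrayNiveles.append(i)
--
--     for i in array[1::2]:
--         arrayMovimientos.append(i)
--
--     for nivel, movimiento in zip(arrayNiveles, arrayMovimientos):
--         arrayRespuesta.append((nivel,movimiento))
--
--     return arrayRespuesta
-- ===== SOURCE B (Python) =====
-- def convertirArrayMovimientos(array):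
--     arrayRespuesta = []
--     i = 0
--     while i + 1 < len(array):
--         arrayRespuesta.append((array[i], array[i + 1]))
--         i += 2
--     return arrayRespuesta
-- ===== Notes on version B (the rewrite author's own statement) =====
-- stated objective: simpler
-- what changed: Replaced the two strided slices, three loops and two intermediate lists with a single index-driven pass that emits each (level, move) pair directly.
import Mathlib
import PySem

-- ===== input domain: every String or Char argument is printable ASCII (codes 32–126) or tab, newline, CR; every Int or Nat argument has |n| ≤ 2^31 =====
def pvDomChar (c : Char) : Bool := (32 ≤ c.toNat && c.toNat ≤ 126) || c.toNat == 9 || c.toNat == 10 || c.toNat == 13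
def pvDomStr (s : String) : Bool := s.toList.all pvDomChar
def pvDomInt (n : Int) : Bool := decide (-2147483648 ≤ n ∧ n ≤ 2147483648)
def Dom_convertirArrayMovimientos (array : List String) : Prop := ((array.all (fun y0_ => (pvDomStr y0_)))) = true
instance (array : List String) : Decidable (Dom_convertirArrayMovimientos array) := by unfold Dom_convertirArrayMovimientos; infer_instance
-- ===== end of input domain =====

-- B replaces A's two strided slices, three loops and two intermediate lists with one
-- index-driven pass that emits each (level, move) pair directly (simpler, same O(n) cost).


-- ===== PORT A =====
-- array[::2] and array[1::2] are PySem.List.slice?; the step literal 2 is nonzero, so the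
-- option is always `some` and `.getD []` is never the default (proved in the lemmas below).
def convertirArrayMovimientos (array : List String) : List (String × String) :=
  let arrayNiveles :=
    ((PySem.List.slice? array none none 2).getD []).foldl (fun acc i => acc ++ [i]) []
  let arrayMovimientos :=
    ((PySem.List.slice? array (some 1) none 2).getD []).foldl (fun acc i => acc ++ [i]) []
  (arrayNiveles.zip arrayMovimientos).foldl (fun acc p => acc ++ [p]) []

-- ===== PORT B =====
-- port of Source B's while loop: index i advances by 2, pairs appended to the accumulator
def pvAltGo (array : List String) (acc : List (String × String)) (i : Nat) :
    List (String × String) :=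
  if h : i + 1 < array.length then
    pvAltGo array (acc ++ [(array[i], array[i + 1])]) (i + 2)
  else acc
termination_by array.length - i

def convertirArrayMovimientos_alt (array : List String) : List (String × String) :=
  pvAltGo array [] 0

-- ===== PRECONDITION & SPEC =====
def Spec_convertirArrayMovimientos (array : List String) (out : List (String × String)) : Prop := out = convertirArrayMovimientos_alt array
instance (array : List String) (out : List (String × String)) : Decidable (Spec_convertirArrayMovimientos array out) := by unfold Spec_convertirArrayMovimientos; infer_instance

-- ===== CLAIM (what is proved, stated in full; the proofs are below) =====
def Claim_equal_convertirArrayMovimientos : Prop := ∀ (array : List String), Dom_convertirArrayMovimientos array → Spec_convertirArrayMovimientos array (convertirArrayMovimientos array)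

-- ===== LEMMAS AND PROOFS =====

-- the even-indexed elements of a list
def pvEvens {α : Type} : List α → List α
  | [] => []
  | [a] => [a]
  | a :: _ :: r => a :: pvEvens r

-- consecutive disjoint pairs of a list (the specification both sides compute)
def pvPairs {α : Type} : List α → List (α × α)
  | a :: b :: r => (a, b) :: pvPairs r
  | _ => []

theorem pv_foldl_app {α : Type} (l acc : List α) :
    l.foldl (fun a i => a ++ [i]) acc = acc ++ l := by
  induction l generalizing acc with
  | nil => simp
  | cons x t ih => simp [List.foldl, ih]

theorem pvEvens_core {α : Type} (xs : List α) :
    (List.range ((xs.length + 1) / 2)).filterMap (fun k => xs[2 * k]?) = pvEvens xs := by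
  induction xs using pvEvens.induct with
  | case1 => simp [pvEvens]
  | case2 a => simp [pvEvens]
  | case3 a b r ih =>
    have hlen : ((a :: b :: r).length + 1) / 2 = (r.length + 1) / 2 + 1 := by
      simp [List.length_cons]; omega
    rw [hlen, List.range_succ_eq_map, List.filterMap_cons, List.filterMap_map]
    simp only [Function.comp]
    have : ∀ k : Nat, (a :: b :: r)[2 * (k + 1)]? = r[2 * k]? := by
      intro k
      have h2 : 2 * (k + 1) = 2 * k + 1 + 1 := by omega
      simp [h2]
    simp only [this]
    simp [pvEvens, ih]

theorem pv_sliceA {α : Type} (xs : List α) :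
    PySem.List.slice? xs none none 2 = some (pvEvens xs) := by
  rw [PySem.List.slice?]
  simp only [PySem.List.sliceIndices]
  norm_num
  have hcnt : (if 0 < xs.length then (((xs.length : ℤ) + 2 - 1) / 2).toNat else 0)
      = (xs.length + 1) / 2 := by
    split_ifs with h
    · omega
    · omega
  rw [hcnt]
  have hfun : ∀ k : Nat, ((2 * (k:ℤ))).toNat = 2 * k := by intro k; omega
  simp only [hfun]
  exact pvEvens_core xs

theorem pv_sliceB {α : Type} (xs : List α) :
    PySem.List.slice? xs (some 1) none 2 = some (pvEvens xs.tail) := by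
  cases xs with
  | nil => rw [PySem.List.slice?]; simp [PySem.List.sliceIndices, pvEvens]
  | cons a t =>
    rw [PySem.List.slice?]
    simp only [PySem.List.sliceIndices]
    norm_num
    have hcnt : (if 0 < t.length then (((t.length : ℤ) + 2 - 1) / 2).toNat else 0)
        = (t.length + 1) / 2 := by
      split_ifs with h
      · omega
      · omega
    rw [hcnt]
    have hidx : ∀ k : Nat, (a :: t)[((1:ℤ) + 2 * (k:ℤ)).toNat]? = t[2 * k]? := by
      intro k
      have : ((1:ℤ) + 2 * (k:ℤ)).toNat = 2 * k + 1 := by omega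
      simp [this]
    simp only [hidx]
    rw [pvEvens_core t]

theorem pvEvens_cons {α : Type} (x : α) (t : List α) :
    pvEvens (x :: t) = x :: pvEvens t.tail := by
  cases t <;> simp [pvEvens]

theorem pv_zip_evens {α : Type} (xs : List α) :
    (pvEvens xs).zip (pvEvens xs.tail) = pvPairs xs := by
  induction xs using pvPairs.induct with
  | case1 a b r ih =>
    rw [pvEvens_cons a (b :: r)]
    simp only [List.tail_cons]
    rw [pvEvens_cons b r]
    simp [List.zip, pvPairs, ← ih]
  | case2 xs h =>
    match xs, h with
    | [], _ => simp [pvEvens, pvPairs]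
    | [a], _ => simp [pvEvens, pvPairs]
    | a :: b :: r, h => exact absurd rfl (fun hh => h a b r hh)

theorem pvPairs_short {α : Type} (l : List α) (h : l.length ≤ 1) : pvPairs l = [] := by
  match l, h with
  | [], _ => rfl
  | [a], _ => rfl
  | a :: b :: r, h => simp at h

theorem pvAltGo_eq (array : List String) (acc : List (String × String)) (i : Nat) :
    pvAltGo array acc i = acc ++ pvPairs (array.drop i) := by
  refine pvAltGo.induct array
    (fun acc i => pvAltGo array acc i = acc ++ pvPairs (array.drop i)) ?_ ?_ acc i
  · intro acc i h ih
    rw [pvAltGo]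
    simp only [h, dif_pos]
    rw [ih]
    have h1 : array.drop i = array[i] :: array.drop (i + 1) :=
      List.drop_eq_getElem_cons (by omega)
    have h2 : array.drop (i + 1) = array[i + 1] :: array.drop (i + 2) :=
      List.drop_eq_getElem_cons (by omega)
    rw [h1, h2, pvPairs]
    simp
  · intro acc i h
    rw [pvAltGo]
    simp only [h, dif_neg, not_false_iff]
    rw [pvPairs_short]
    · simp
    · simp [List.length_drop]
      omega

-- ===== VERDICT (by name: the statement is the Claim_ definition above) =====
theorem convertirArrayMovimientos_spec : Claim_equal_convertirArrayMovimientos := by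
  intro array _
  unfold Spec_convertirArrayMovimientos convertirArrayMovimientos convertirArrayMovimientos_alt
  rw [pv_sliceA, pv_sliceB]
  simp only [Option.getD_some, pv_foldl_app, List.nil_append]
  rw [pv_zip_evens, pvAltGo_eq]
  simp
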